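-- pv_equiv track=rewrite | github.com/Bhavesh398/Ext | features/structural.py | get_root_domain
-- ===== SOURCE A (Python) =====
-- def get_root_domain(domain: str) -> str:
--     """
--     Extract root domain from a full domain string.
--     Handles multi-part TLDs like .co.in, .com.au etc.
--
--     Examples:
--         esisc.nse.co.in  -> nse.co.in
--         mail.paypal.com  -> paypal.com
--         nse.co.in        -> nse.co.in
--     """
--     # Known multi-part TLDs (extend as needed)
--     MULTI_TLDS = {".co.in", ".com.au", ".co.uk", ".org.uk", ".net.in", ".gov.in"}
--
--     domain = domain.lower().strip()
--     for tld in MULTI_TLDS: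
--         if domain.endswith(tld):
--             # Get one label before the multi-TLD
--             prefix = domain[: -len(tld)]
--             label = prefix.split(".")[-1]
--             return f"{label}{tld}"
--
--     # Standard: take last two parts
--     parts = domain.split(".")
--     if len(parts) >= 2:
--         return ".".join(parts[-2:])
--     return domain
-- ===== SOURCE B (Python) =====
-- BARE_MULTI_TLDS = frozenset({"co.in", "com.au", "co.uk", "org.uk", "net.in", "gov.in"})
--
--
-- def get_root_domain(domain: str) -> str:
--     domain = domain.lower().strip()
--     parts = domain.split(".")
--     suffix = ".".join(parts[-2:])
--     if suffix in BARE_MULTI_TLDS: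
--         return ".".join(parts[-3:])
--     if len(parts) >= 2:
--         return suffix
--     return domain
-- ===== Notes on version B (the rewrite author's own statement) =====
-- stated objective: idiomatic
-- what changed: B splits the domain into dot-separated parts once and decides via a computed two-label suffix key looked up in a set of bare multi-TLD suffixes, instead of A's per-TLD endswith scan with slicing and a second split of the prefix.
import Mathlib
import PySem

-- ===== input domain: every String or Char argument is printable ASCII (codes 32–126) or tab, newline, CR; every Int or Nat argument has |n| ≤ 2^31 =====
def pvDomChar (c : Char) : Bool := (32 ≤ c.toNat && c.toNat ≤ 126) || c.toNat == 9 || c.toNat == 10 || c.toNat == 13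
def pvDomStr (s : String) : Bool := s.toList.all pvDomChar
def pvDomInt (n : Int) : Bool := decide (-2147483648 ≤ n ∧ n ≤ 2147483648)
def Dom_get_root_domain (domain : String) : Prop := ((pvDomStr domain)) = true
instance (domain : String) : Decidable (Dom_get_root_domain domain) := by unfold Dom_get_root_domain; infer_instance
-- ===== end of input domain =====

-- B replaces A's per-TLD endswith scan by one split and a computed two-label suffix key
-- looked up in a set of bare multi-TLD suffixes (objective: idiomatic).
-- A iterates over a Python set literal with early return; at most one of the six suffixes can
-- match a given string (none is a suffix of another), so the result is independent of the
-- set's hash iteration order and the literal order below is exact.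

-- ===== PORT A =====
-- the six multi-part TLDs, in the literal's order
def aTlds : List String := [".co.in", ".com.au", ".co.uk", ".org.uk", ".net.in", ".gov.in"]

-- the 'for tld in MULTI_TLDS' loop with its early returns; falls through to the standard branch
def aLoop (d : String) : List String → String
  | [] =>
    -- parts = domain.split("."): sep "." is nonempty, split? never returns none here
    let parts := (PySem.Str.split? d ".").getD []
    if 2 ≤ parts.length then PySem.Str.join "." (PySem.List.slice parts (some (-2)) none) else d
  | tld :: rest =>
    if PySem.Str.endswith d tld then
      -- prefix = domain[: -len(tld)]
      let pre := PySem.Str.slice d none (some (-(PySem.Str.len tld)))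
      -- prefix.split(".")[-1]: split with a nonempty sep never returns none and never returns [],
      -- so both getD defaults are unreachable
      let label := (PySem.List.pyGet? ((PySem.Str.split? pre ".").getD []) (-1)).getD ""
      label ++ tld
    else aLoop d rest

def get_root_domain (domain : String) : String :=
  aLoop (PySem.Str.strip (PySem.Str.lower domain)) aTlds

-- ===== PORT B =====
def bareMultiTlds : PySem.Set String :=
  PySem.Set.ofList ["co.in", "com.au", "co.uk", "org.uk", "net.in", "gov.in"]

def get_root_domain_alt (domain : String) : String :=
  let d := PySem.Str.strip (PySem.Str.lower domain)
  -- sep "." is nonempty, split? never returns none here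
  let parts := (PySem.Str.split? d ".").getD []
  let suffix := PySem.Str.join "." (PySem.List.slice parts (some (-2)) none)
  if PySem.Set.contains bareMultiTlds suffix then
    PySem.Str.join "." (PySem.List.slice parts (some (-3)) none)
  else if 2 ≤ parts.length then suffix
  else d

-- ===== PRECONDITION & SPEC =====
def Spec_get_root_domain (domain : String) (out : String) : Prop := out = get_root_domain_alt domain
instance (domain : String) (out : String) : Decidable (Spec_get_root_domain domain out) := by unfold Spec_get_root_domain; infer_instance

-- ===== CLAIM (what is proved, stated in full; the proofs are below) =====
def Claim_equal_get_root_domain : Prop := ∀ (domain : String), Dom_get_root_domain domain → Spec_get_root_domain domain (get_root_domain domain)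

-- ===== LEMMAS AND PROOFS =====

-- `sp s` abbreviates Python's s.split(".") at the character level
def sp (s : List Char) : List (List Char) := List.splitOnP (fun c => c == '.') s

theorem go_eq (fuel : Nat) (l cur : List Char) (acc : List (List Char)) (hf : l.length < fuel) :
    PySem.Chars.splitOn.go ['.'] fuel l cur acc
      = acc.reverse ++ (sp l).modifyHead (cur.reverse ++ ·) := by
  induction fuel generalizing l cur acc with
  | zero => omega
  | succ n ih =>
    cases l with
    | nil =>
      simp [PySem.Chars.splitOn.go, sp, List.splitOnP_nil]
    | cons c rest =>
      rw [PySem.Chars.splitOn.go]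
      by_cases hc : c = '.'
      · subst hc
        have hp : List.isPrefixOf ['.'] ('.' :: rest) = true := by simp [List.isPrefixOf]
        simp only [hp, if_pos]
        rw [ih _ _ _ (by simpa using Nat.lt_of_succ_lt_succ hf)]
        simp [sp, List.splitOnP_cons]
        rcases hsp : List.splitOnP (fun c => c == '.') rest with _ | ⟨h, t⟩
        · exact absurd hsp (List.splitOnP_ne_nil _ rest)
        · simp
      · have hp : List.isPrefixOf ['.'] (c :: rest) = false := by
          simp [List.isPrefixOf]
          exact fun h => hc h.symm
        simp only [hp, Bool.false_eq_true, if_false]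
        rw [ih _ _ _ (by simpa using Nat.lt_of_succ_lt_succ hf)]
        simp only [sp, List.splitOnP_cons, beq_iff_eq, hc, if_false]
        rcases hsp : List.splitOnP (fun c => c == '.') rest with _ | ⟨h, t⟩
        · exact absurd hsp (List.splitOnP_ne_nil _ rest)
        · simp

theorem chars_splitOn_eq (s : List Char) : PySem.Chars.splitOn s ['.'] = sp s := by
  rw [PySem.Chars.splitOn, go_eq _ _ _ _ (Nat.lt_succ_self _)]
  rcases hsp : sp s with _ | ⟨h, t⟩
  · exact absurd hsp (List.splitOnP_ne_nil _ s)
  · simp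

theorem sp_ne_nil (s : List Char) : sp s ≠ [] := List.splitOnP_ne_nil _ s

theorem sp_dotfree (s : List Char) : ∀ l ∈ sp s, '.' ∉ l := by
  induction s with
  | nil => simp [sp, List.splitOnP_nil]
  | cons c rest ih =>
    intro l hl
    rw [sp, List.splitOnP_cons] at hl
    by_cases hc : c = '.'
    · subst hc; simp at hl
      rcases hl with h | h
      · simp [h]
      · exact ih l h
    · simp [hc] at hl
      rcases hsp : List.splitOnP (fun c => c == '.') rest with _ | ⟨hd0, tl0⟩
      · exact absurd hsp (List.splitOnP_ne_nil _ rest)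
      · rw [hsp] at hl
        simp at hl
        rcases hl with h | h
        · subst h
          intro hm
          rcases List.mem_cons.mp hm with h | h
          · exact hc h.symm
          · exact ih hd0 (by rw [sp, hsp]; exact List.mem_cons_self ..) h
        · exact ih l (by rw [sp, hsp]; exact List.mem_cons_of_mem _ h)

theorem sp_append (a b : List Char) : sp (a ++ '.' :: b) = sp a ++ sp b := by
  induction a with
  | nil => simp [sp, List.splitOnP_cons, List.splitOnP_nil]
  | cons c a ih =>
    simp only [List.cons_append, sp, List.splitOnP_cons] at *
    by_cases hc : c = '.'
    · simp [hc, ih]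
    · simp only [beq_iff_eq, hc, if_false, ih]
      rcases hsp : List.splitOnP (fun c => c == '.') a with _ | ⟨h, t⟩
      · exact absurd hsp (List.splitOnP_ne_nil _ a)
      · simp

theorem sp_single (a : List Char) (h : '.' ∉ a) : sp a = [a] := by
  induction a with
  | nil => simp [sp, List.splitOnP_nil]
  | cons c a ih =>
    have hc : ¬ c = '.' := fun hh => h (by simp [hh])
    rw [sp, List.splitOnP_cons]
    simp only [beq_iff_eq, hc, if_false]
    rw [show List.splitOnP (fun c => c == '.') a = sp a from rfl,
        ih (fun hm => h (List.mem_cons_of_mem _ hm))]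
    simp

theorem sp_join (s : List Char) : List.intercalate ['.'] (sp s) = s := by
  have := List.intercalate_splitOn s '.'
  simpa [List.splitOn, sp] using this

theorem intercalate_concat2 (x y : List Char) (l : List (List Char)) (hl : l ≠ []) :
    List.intercalate ['.'] (l ++ [x, y]) = List.intercalate ['.'] l ++ '.' :: (x ++ '.' :: y) := by
  induction l with
  | nil => exact absurd rfl hl
  | cons a l ih =>
    cases l with
    | nil => simp [List.intercalate]
    | cons b l =>
      have h1 : List.intercalate ['.'] ((a :: b :: l) ++ [x, y])
          = a ++ '.' :: List.intercalate ['.'] ((b :: l) ++ [x, y]) := by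
        simp [List.intercalate]
      have h2 : List.intercalate ['.'] (a :: b :: l) = a ++ '.' :: List.intercalate ['.'] (b :: l) := by
        simp [List.intercalate]
      rw [h1, ih (by simp), h2]
      simp

theorem fire_decomp (s x y : List Char)
    (h3 : 3 ≤ (sp s).length) (hd : (sp s).drop ((sp s).length - 2) = [x, y]) :
    ∃ p, s = p ++ '.' :: (x ++ '.' :: y) ∧ sp p = (sp s).take ((sp s).length - 2) := by
  set t := (sp s).take ((sp s).length - 2) with ht
  have htn : t ≠ [] := by
    have : t.length = (sp s).length - 2 := by
      rw [ht, List.length_take]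
      omega
    intro h
    rw [h] at this
    simp at this
    omega
  refine ⟨List.intercalate ['.'] t, ?_, ?_⟩
  · conv_lhs => rw [← sp_join s, ← List.take_append_drop ((sp s).length - 2) (sp s)]
    rw [hd, intercalate_concat2 _ _ _ htn]
  · have hdf : ∀ l ∈ t, '.' ∉ l := fun l hl => sp_dotfree s l (List.mem_of_mem_take hl)
    have := List.splitOn_intercalate t '.' hdf htn
    simpa [List.splitOn, sp] using this

theorem suffix_iff (s x y : List Char) (dx : '.' ∉ x) (dy : '.' ∉ y) :
    ('.' :: (x ++ '.' :: y)) <:+ s ↔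
      3 ≤ (sp s).length ∧ (sp s).drop ((sp s).length - 2) = [x, y] := by
  constructor
  · rintro ⟨p, rfl⟩
    have hsp : sp (p ++ '.' :: (x ++ '.' :: y)) = sp p ++ [x, y] := by
      rw [sp_append, sp_append, sp_single x dx, sp_single y dy]
      simp
    rw [hsp]
    have hp := sp_ne_nil p
    constructor
    · have : 1 ≤ (sp p).length := List.length_pos_of_ne_nil hp
      simp
      omega
    · have : (sp p).length + 2 - 2 = (sp p).length := by omega
      simp [this]
  · rintro ⟨h3, hd⟩
    obtain ⟨p, rfl, -⟩ := fire_decomp s x y h3 hd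
    exact ⟨p, rfl⟩

theorem slice_neg_from {α : Type} (l : List α) (k : Nat) (hk : 0 < k) :
    PySem.List.slice l (some (-(k : Int))) none = l.drop (l.length - k) := by
  simp [PySem.List.slice, PySem.List.clampIdx_neg_natCast _ _ hk]

theorem slice_neg_to {α : Type} (l : List α) (k : Nat) (hk : 0 < k) :
    PySem.List.slice l none (some (-(k : Int))) = l.take (l.length - k) := by
  simp [PySem.List.slice, PySem.List.clampIdx_neg_natCast _ _ hk]

theorem dot_split_unique (a b x y : List Char) (da : '.' ∉ a) (dx : '.' ∉ x)
    (h : a ++ '.' :: b = x ++ '.' :: y) : a = x ∧ b = y := by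
  induction a generalizing x with
  | nil =>
    cases x with
    | nil => simpa using h
    | cons c xs =>
      simp at h
      exact absurd (h.1 ▸ List.mem_cons_self ..) dx
  | cons c as ih =>
    cases x with
    | nil =>
      simp at h
      exact absurd (h.1 ▸ List.mem_cons_self ..) da
    | cons d xs =>
      simp at h
      obtain ⟨rfl, h2⟩ := h
      have := ih xs (fun hm => da (List.mem_cons_of_mem _ hm)) (fun hm => dx (List.mem_cons_of_mem _ hm)) h2
      exact ⟨by rw [this.1], this.2⟩

theorem parts_eq (s : String) :
    (PySem.Str.split? s ".").getD [] = (sp s.toList).map String.ofList := by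
  simp [PySem.Str.split?, PySem.Chars.split?, chars_splitOn_eq]

theorem join_ofList (sep : String) (parts : List (List Char)) :
    PySem.Str.join sep (parts.map String.ofList) = String.ofList (List.intercalate sep.toList parts) := by
  simp only [PySem.Str.join, PySem.Chars.join, List.map_map]
  congr 1
  congr 1
  simp [Function.comp_def]

theorem ends_iff (d tld : String) (x y : List Char) (dx : '.' ∉ x) (dy : '.' ∉ y)
    (htld : tld.toList = '.' :: (x ++ '.' :: y)) :
    PySem.Str.endswith d tld = true ↔
      3 ≤ (sp d.toList).length ∧ (sp d.toList).drop ((sp d.toList).length - 2) = [x, y] := by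
  rw [PySem.Str.endswith_eq, PySem.Chars.endswith_iff, htld, suffix_iff _ _ _ dx dy]

theorem sfx_eq (d : String) :
    PySem.Str.join "." (PySem.List.slice ((PySem.Str.split? d ".").getD []) (some (-2)) none)
      = String.ofList (List.intercalate ['.'] ((sp d.toList).drop ((sp d.toList).length - 2))) := by
  rw [parts_eq]
  rw [show ((-2 : Int) = -((2 : Nat) : Int)) from by norm_num]
  rw [slice_neg_from _ _ (by norm_num)]
  rw [List.length_map, ← List.map_drop, join_ofList]
  rfl

theorem sfx3_eq (d : String) :
    PySem.Str.join "." (PySem.List.slice ((PySem.Str.split? d ".").getD []) (some (-3)) none)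
      = String.ofList (List.intercalate ['.'] ((sp d.toList).drop ((sp d.toList).length - 3))) := by
  rw [parts_eq]
  rw [show ((-3 : Int) = -((3 : Nat) : Int)) from by norm_num]
  rw [slice_neg_from _ _ (by norm_num)]
  rw [List.length_map, ← List.map_drop, join_ofList]
  rfl

theorem fire_value (d tld : String) (x y : List Char)
    (htld : tld.toList = '.' :: (x ++ '.' :: y))
    (h3 : 3 ≤ (sp d.toList).length)
    (hd : (sp d.toList).drop ((sp d.toList).length - 2) = [x, y]) :
    (PySem.List.pyGet? ((PySem.Str.split? (PySem.Str.slice d none (some (-(PySem.Str.len tld)))) ".").getD []) (-1)).getD "" ++ tld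
      = PySem.Str.join "." (PySem.List.slice ((PySem.Str.split? d ".").getD []) (some (-3)) none) := by
  obtain ⟨p, hp, hspp⟩ := fire_decomp d.toList x y h3 hd
  have hps : sp d.toList = sp p ++ [x, y] := by
    conv_lhs => rw [← List.take_append_drop ((sp d.toList).length - 2) (sp d.toList)]
    rw [hd, hspp]
  rcases List.eq_nil_or_concat (sp p) with hnil | ⟨q, lab, hq⟩
  · exact absurd hnil (sp_ne_nil p)
  rw [List.concat_eq_append] at hq
  -- the sliced prefix is exactly p
  have hpre : PySem.Str.slice d none (some (-(PySem.Str.len tld))) = String.ofList p := by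
    apply String.toList_inj.mp
    simp only [PySem.Str.slice, String.toList_ofList, PySem.Chars.slice_eq_listSlice]
    rw [show PySem.Str.len tld = ((('.' :: (x ++ '.' :: y)).length : Nat) : Int) from by
      simp [PySem.Str.len, htld]]
    rw [slice_neg_to _ _ (by simp)]
    rw [hp]
    have hlen : (p ++ '.' :: (x ++ '.' :: y)).length - ('.' :: (x ++ '.' :: y)).length = p.length := by
      simp
    rw [hlen, List.take_left]
  rw [hpre, parts_eq, String.toList_ofList, hq]
  have hget : PySem.List.pyGet? ((q ++ [lab]).map String.ofList) (-1) = some (String.ofList lab) := by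
    simp [PySem.List.pyGet?, PySem.List.pyIdx?]
  rw [hget, Option.getD_some, sfx3_eq]
  have hdrop : (sp d.toList).drop ((sp d.toList).length - 3) = [lab, x, y] := by
    rw [hps, hq]
    have h1 : ((q ++ [lab]) ++ [x, y]).length - 3 = q.length := by simp
    rw [h1, show ((q ++ [lab]) ++ [x, y] = q ++ [lab, x, y]) from by simp, List.drop_left]
  rw [hdrop]
  apply String.toList_inj.mp
  simp [htld, List.intercalate]

theorem mem_char (sfx : String) :
    PySem.Set.contains bareMultiTlds sfx = true ↔
      (sfx = "co.in" ∨ sfx = "com.au" ∨ sfx = "co.uk" ∨ sfx = "org.uk" ∨ sfx = "net.in" ∨ sfx = "gov.in") := by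
  rw [bareMultiTlds, PySem.Set.contains_iff, PySem.Set.mem_ofList]
  simp

theorem ofList_inj (a b : List Char) : String.ofList a = String.ofList b ↔ a = b := by
  constructor
  · intro h
    have := congrArg String.toList h
    simpa using this
  · rintro rfl; rfl

theorem main_eq (d : String) : aLoop d aTlds =
    (let parts := (PySem.Str.split? d ".").getD []
     let suffix := PySem.Str.join "." (PySem.List.slice parts (some (-2)) none)
     if PySem.Set.contains bareMultiTlds suffix then
       PySem.Str.join "." (PySem.List.slice parts (some (-3)) none)
     else if 2 ≤ parts.length then suffix
     else d) := by
  simp only []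
  have hplen : ((PySem.Str.split? d ".").getD []).length = (sp d.toList).length := by
    rw [parts_eq]; simp
  have hnpos : 0 < (sp d.toList).length := List.length_pos_of_ne_nil (sp_ne_nil d.toList)
  have e1 := ends_iff d ".co.in" ['c','o'] ['i','n'] (by decide) (by decide) (by decide)
  have e2 := ends_iff d ".com.au" ['c','o','m'] ['a','u'] (by decide) (by decide) (by decide)
  have e3 := ends_iff d ".co.uk" ['c','o'] ['u','k'] (by decide) (by decide) (by decide)
  have e4 := ends_iff d ".org.uk" ['o','r','g'] ['u','k'] (by decide) (by decide) (by decide)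
  have e5 := ends_iff d ".net.in" ['n','e','t'] ['i','n'] (by decide) (by decide) (by decide)
  have e6 := ends_iff d ".gov.in" ['g','o','v'] ['i','n'] (by decide) (by decide) (by decide)
  by_cases h3 : 3 ≤ (sp d.toList).length
  · -- at least three labels: the multi-TLD branch may fire
    obtain ⟨a, b, hd, da, db⟩ :
        ∃ a b, (sp d.toList).drop ((sp d.toList).length - 2) = [a, b] ∧ '.' ∉ a ∧ '.' ∉ b := by
      have hlen2 : ((sp d.toList).drop ((sp d.toList).length - 2)).length = 2 := by
        simp; omega
      rcases hdp : (sp d.toList).drop ((sp d.toList).length - 2) with _ | ⟨a, _ | ⟨b, _ | _⟩⟩ <;>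
        rw [hdp] at hlen2 <;> simp at hlen2
      refine ⟨a, b, rfl, ?_, ?_⟩
      · exact sp_dotfree d.toList a (List.drop_subset _ _ (by rw [hdp]; exact List.mem_cons_self ..))
      · exact sp_dotfree d.toList b (List.drop_subset _ _ (by rw [hdp]; simp))
    have hsfx : PySem.Str.join "." (PySem.List.slice ((PySem.Str.split? d ".").getD []) (some (-2)) none)
        = String.ofList (a ++ '.' :: b) := by
      rw [sfx_eq, hd]
      apply String.toList_inj.mp
      simp [List.intercalate]
    have hduniq : ∀ (x y : List Char), '.' ∉ x →
        (a ++ '.' :: b = x ++ '.' :: y ↔ (a = x ∧ b = y)) := by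
      intro x y dx
      exact ⟨dot_split_unique a b x y da dx, by rintro ⟨rfl, rfl⟩; rfl⟩
    have hfire : ∀ (tld : String) (x y : List Char), '.' ∉ x → '.' ∉ y →
        tld.toList = '.' :: (x ++ '.' :: y) → a = x → b = y →
        (PySem.List.pyGet? ((PySem.Str.split? (PySem.Str.slice d none (some (-(PySem.Str.len tld)))) ".").getD []) (-1)).getD "" ++ tld
          = PySem.Str.join "." (PySem.List.slice ((PySem.Str.split? d ".").getD []) (some (-3)) none) := by
      rintro tld x y dx dy htld rfl rfl
      exact fire_value d tld a b htld h3 hd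
    have hmem := mem_char (String.ofList (a ++ '.' :: b))
    -- translate the six string equalities into pair equalities
    have hco : ∀ (w : String) (x y : List Char), '.' ∉ x → w.toList = x ++ '.' :: y →
        (String.ofList (a ++ '.' :: b) = w ↔ (a = x ∧ b = y)) := by
      intro w x y dx hw
      rw [show w = String.ofList (x ++ '.' :: y) from by
            apply String.toList_inj.mp; simp [hw],
          ofList_inj]
      exact hduniq x y dx
    have c1 := hco "co.in" ['c','o'] ['i','n'] (by decide) (by decide)
    have c2 := hco "com.au" ['c','o','m'] ['a','u'] (by decide) (by decide)
    have c3 := hco "co.uk" ['c','o'] ['u','k'] (by decide) (by decide)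
    have c4 := hco "org.uk" ['o','r','g'] ['u','k'] (by decide) (by decide)
    have c5 := hco "net.in" ['n','e','t'] ['i','n'] (by decide) (by decide)
    have c6 := hco "gov.in" ['g','o','v'] ['i','n'] (by decide) (by decide)
    have hEf : ∀ (tld : String) (x y : List Char),
        (PySem.Str.endswith d tld = true ↔
          (3 ≤ (sp d.toList).length ∧ (sp d.toList).drop ((sp d.toList).length - 2) = [x, y])) →
        ¬(a = x ∧ b = y) → PySem.Str.endswith d tld = false := by
      intro tld x y hiff hS
      rw [Bool.eq_false_iff]
      intro h
      have h2 := (hiff.mp h).2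
      rw [hd] at h2
      simp at h2
      exact hS ⟨h2.1, h2.2⟩
    by_cases S1 : a = ['c','o'] ∧ b = ['i','n']
    · have hE : PySem.Str.endswith d ".co.in" = true := e1.mpr ⟨h3, by rw [hd, S1.1, S1.2]⟩
      have hM : PySem.Set.contains bareMultiTlds
          (PySem.Str.join "." (PySem.List.slice ((PySem.Str.split? d ".").getD []) (some (-2)) none)) = true := by
        rw [hsfx]; exact hmem.mpr (Or.inl (c1.mpr S1))
      simp only [aTlds, aLoop, hE, if_pos, hM]
      exact hfire ".co.in" ['c','o'] ['i','n'] (by decide) (by decide) (by decide) S1.1 S1.2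
    · by_cases S2 : a = ['c','o','m'] ∧ b = ['a','u']
      · have hE1 := hEf _ _ _ e1 S1
        have hE : PySem.Str.endswith d ".com.au" = true := e2.mpr ⟨h3, by rw [hd, S2.1, S2.2]⟩
        have hM : PySem.Set.contains bareMultiTlds
            (PySem.Str.join "." (PySem.List.slice ((PySem.Str.split? d ".").getD []) (some (-2)) none)) = true := by
          rw [hsfx]; exact hmem.mpr (Or.inr (Or.inl (c2.mpr S2)))
        simp only [aTlds, aLoop, hE1, hE, Bool.false_eq_true, if_false, if_pos, hM]
        exact hfire ".com.au" ['c','o','m'] ['a','u'] (by decide) (by decide) (by decide) S2.1 S2.2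
      · by_cases S3 : a = ['c','o'] ∧ b = ['u','k']
        · have hE1 := hEf _ _ _ e1 S1
          have hE2 := hEf _ _ _ e2 S2
          have hE : PySem.Str.endswith d ".co.uk" = true := e3.mpr ⟨h3, by rw [hd, S3.1, S3.2]⟩
          have hM : PySem.Set.contains bareMultiTlds
              (PySem.Str.join "." (PySem.List.slice ((PySem.Str.split? d ".").getD []) (some (-2)) none)) = true := by
            rw [hsfx]; exact hmem.mpr (Or.inr (Or.inr (Or.inl (c3.mpr S3))))
          simp only [aTlds, aLoop, hE1, hE2, hE, Bool.false_eq_true, if_false, if_pos, hM]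
          exact hfire ".co.uk" ['c','o'] ['u','k'] (by decide) (by decide) (by decide) S3.1 S3.2
        · by_cases S4 : a = ['o','r','g'] ∧ b = ['u','k']
          · have hE1 := hEf _ _ _ e1 S1
            have hE2 := hEf _ _ _ e2 S2
            have hE3 := hEf _ _ _ e3 S3
            have hE : PySem.Str.endswith d ".org.uk" = true := e4.mpr ⟨h3, by rw [hd, S4.1, S4.2]⟩
            have hM : PySem.Set.contains bareMultiTlds
                (PySem.Str.join "." (PySem.List.slice ((PySem.Str.split? d ".").getD []) (some (-2)) none)) = true := by
              rw [hsfx]; exact hmem.mpr (Or.inr (Or.inr (Or.inr (Or.inl (c4.mpr S4)))))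
            simp only [aTlds, aLoop, hE1, hE2, hE3, hE, Bool.false_eq_true, if_false, if_pos, hM]
            exact hfire ".org.uk" ['o','r','g'] ['u','k'] (by decide) (by decide) (by decide) S4.1 S4.2
          · by_cases S5 : a = ['n','e','t'] ∧ b = ['i','n']
            · have hE1 := hEf _ _ _ e1 S1
              have hE2 := hEf _ _ _ e2 S2
              have hE3 := hEf _ _ _ e3 S3
              have hE4 := hEf _ _ _ e4 S4
              have hE : PySem.Str.endswith d ".net.in" = true := e5.mpr ⟨h3, by rw [hd, S5.1, S5.2]⟩
              have hM : PySem.Set.contains bareMultiTlds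
                  (PySem.Str.join "." (PySem.List.slice ((PySem.Str.split? d ".").getD []) (some (-2)) none)) = true := by
                rw [hsfx]; exact hmem.mpr (Or.inr (Or.inr (Or.inr (Or.inr (Or.inl (c5.mpr S5))))))
              simp only [aTlds, aLoop, hE1, hE2, hE3, hE4, hE, Bool.false_eq_true, if_false, if_pos, hM]
              exact hfire ".net.in" ['n','e','t'] ['i','n'] (by decide) (by decide) (by decide) S5.1 S5.2
            · by_cases S6 : a = ['g','o','v'] ∧ b = ['i','n']
              · have hE1 := hEf _ _ _ e1 S1
                have hE2 := hEf _ _ _ e2 S2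
                have hE3 := hEf _ _ _ e3 S3
                have hE4 := hEf _ _ _ e4 S4
                have hE5 := hEf _ _ _ e5 S5
                have hE : PySem.Str.endswith d ".gov.in" = true := e6.mpr ⟨h3, by rw [hd, S6.1, S6.2]⟩
                have hM : PySem.Set.contains bareMultiTlds
                    (PySem.Str.join "." (PySem.List.slice ((PySem.Str.split? d ".").getD []) (some (-2)) none)) = true := by
                  rw [hsfx]; exact hmem.mpr (Or.inr (Or.inr (Or.inr (Or.inr (Or.inr (c6.mpr S6))))))
                simp only [aTlds, aLoop, hE1, hE2, hE3, hE4, hE5, hE, Bool.false_eq_true, if_false, if_pos, hM]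
                exact hfire ".gov.in" ['g','o','v'] ['i','n'] (by decide) (by decide) (by decide) S6.1 S6.2
              · -- no multi-TLD matches: both take the standard two-label branch
                have hE1 := hEf _ _ _ e1 S1
                have hE2 := hEf _ _ _ e2 S2
                have hE3 := hEf _ _ _ e3 S3
                have hE4 := hEf _ _ _ e4 S4
                have hE5 := hEf _ _ _ e5 S5
                have hE6 := hEf _ _ _ e6 S6
                have hM : PySem.Set.contains bareMultiTlds
                    (PySem.Str.join "." (PySem.List.slice ((PySem.Str.split? d ".").getD []) (some (-2)) none)) = false := by
                  rw [hsfx, Bool.eq_false_iff]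
                  intro h
                  rcases hmem.mp h with h | h | h | h | h | h
                  · exact S1 (c1.mp h)
                  · exact S2 (c2.mp h)
                  · exact S3 (c3.mp h)
                  · exact S4 (c4.mp h)
                  · exact S5 (c5.mp h)
                  · exact S6 (c6.mp h)
                simp only [aTlds, aLoop, hE1, hE2, hE3, hE4, hE5, hE6, hM, Bool.false_eq_true, if_false]
  · -- fewer than three labels: no endswith can fire
    have hEf3 : ∀ (tld : String) (x y : List Char),
        (PySem.Str.endswith d tld = true ↔
          (3 ≤ (sp d.toList).length ∧ (sp d.toList).drop ((sp d.toList).length - 2) = [x, y])) →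
        PySem.Str.endswith d tld = false := by
      intro tld x y hiff
      rw [Bool.eq_false_iff]
      intro h
      exact h3 (hiff.mp h).1
    have hE1 := hEf3 _ _ _ e1
    have hE2 := hEf3 _ _ _ e2
    have hE3 := hEf3 _ _ _ e3
    have hE4 := hEf3 _ _ _ e4
    have hE5 := hEf3 _ _ _ e5
    have hE6 := hEf3 _ _ _ e6
    simp only [aTlds, aLoop, hE1, hE2, hE3, hE4, hE5, hE6, Bool.false_eq_true, if_false]
    by_cases hM : PySem.Set.contains bareMultiTlds
        (PySem.Str.join "." (PySem.List.slice ((PySem.Str.split? d ".").getD []) (some (-2)) none)) = true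
    · rw [if_pos hM]
      by_cases hn2 : (sp d.toList).length = 2
      · have h2le : 2 ≤ ((PySem.Str.split? d ".").getD []).length := by omega
        rw [if_pos h2le]
        have hslice : PySem.List.slice ((PySem.Str.split? d ".").getD []) (some (-2)) none
            = PySem.List.slice ((PySem.Str.split? d ".").getD []) (some (-3)) none := by
          rw [show ((-2 : Int) = -((2 : Nat) : Int)) from by norm_num,
              show ((-3 : Int) = -((3 : Nat) : Int)) from by norm_num,
              slice_neg_from _ _ (by norm_num), slice_neg_from _ _ (by norm_num), hplen, hn2]
        rw [hslice]
      · -- a single label: the suffix key is dot-free, so it cannot be in the set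
        exfalso
        have hn1 : (sp d.toList).length = 1 := by omega
        obtain ⟨c, hc⟩ : ∃ c, sp d.toList = [c] := by
          rcases hspl : sp d.toList with _ | ⟨c, _ | _⟩ <;> rw [hspl] at hn1 <;> simp at hn1
          exact ⟨c, rfl⟩
        have hcd : '.' ∉ c := sp_dotfree d.toList c (by rw [hc]; exact List.mem_cons_self ..)
        have hsfx1 : PySem.Str.join "." (PySem.List.slice ((PySem.Str.split? d ".").getD []) (some (-2)) none)
            = String.ofList c := by
          rw [sfx_eq, hn1, hc]
          simp [List.intercalate]
        rw [hsfx1] at hM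
        have hw : ∀ (w : String), String.ofList c = w → c = w.toList := by
          intro w h
          have := congrArg String.toList h
          simpa using this
        rcases (mem_char _).mp hM with h | h | h | h | h | h <;>
          exact hcd (by rw [hw _ h]; decide)
    · rw [if_neg hM]

-- ===== VERDICT (by name: the statement is the Claim_ definition above) =====
theorem get_root_domain_spec : Claim_equal_get_root_domain := by
  intro domain _
  unfold Spec_get_root_domain get_root_domain get_root_domain_alt
  exact main_eq _
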